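-- pv_equiv track=rewrite | github.com/mardzien/python_bootcamp | funkcje/zadanie_2.py | wiecej_niz
-- ===== SOURCE A (Python) =====
-- def wiecej_niz(napis, liczba_znakow):
--     liczniki = {}
--     wynik = set()
--     for znak in napis:
--         liczniki[znak] = liczniki.get(znak, 0) + 1
--
--     for znak in liczniki:
--         if liczniki[znak] > liczba_znakow:
--             wynik.add(znak)
--     return wynik
-- ===== SOURCE B (Python) =====
-- def wiecej_niz(napis, liczba_znakow):
--     # recursive partition: peel off the first character, its multiplicity is the
--     # length drop after deleting all its occurrences; recurse on the remainder
--     if not napis: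
--         return set()
--     c = napis[0]
--     reszta = ''.join(z for z in napis if z != c)
--     glowa = {c} if len(napis) - len(reszta) > liczba_znakow else set()
--     return glowa | wiecej_niz(reszta, liczba_znakow)
-- ===== Notes on version B (the rewrite author's own statement) =====
-- stated objective: alternative
-- what changed: Replaces A's frequency-dictionary pass plus filter loop by a quickselect-style recursive partition: peel off the first character, obtain its multiplicity as the length drop after deleting all its occurrences, recurse on the shrunken remainder; no counting table and no filter pass exist.
import Mathlib
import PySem

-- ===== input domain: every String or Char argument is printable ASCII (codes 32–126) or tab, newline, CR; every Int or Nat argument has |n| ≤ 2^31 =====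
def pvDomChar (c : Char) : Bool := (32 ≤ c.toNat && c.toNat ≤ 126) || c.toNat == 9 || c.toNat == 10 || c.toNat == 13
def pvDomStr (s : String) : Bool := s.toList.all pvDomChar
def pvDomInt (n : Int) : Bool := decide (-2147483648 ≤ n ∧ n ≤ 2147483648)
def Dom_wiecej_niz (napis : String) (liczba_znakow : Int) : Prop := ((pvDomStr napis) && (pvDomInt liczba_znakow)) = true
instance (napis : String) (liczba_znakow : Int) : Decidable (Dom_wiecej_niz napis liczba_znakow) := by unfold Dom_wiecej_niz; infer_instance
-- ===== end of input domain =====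

-- B replaces A's frequency-dictionary pass plus filter loop by a recursive partition on the
-- string: peel off the first character, measure its multiplicity as the length drop after
-- deleting its occurrences, recurse on the remainder (alternative decomposition, no table).


-- ===== PORT A =====
-- counting dict over the characters, then a filter loop collecting into a set;
-- the set of 1-char Python strings is returned as List String via the final map
def wiecej_niz (napis : String) (liczba_znakow : Int) : List String :=
  let liczniki : PySem.Dict Char Int :=
    napis.toList.foldl (fun d znak => d.insert znak (d.getD znak 0 + 1)) PySem.Dict.empty
  let wynik : PySem.Set Char :=
    liczniki.keys.foldl
      (fun w znak => if liczniki.getD znak 0 > liczba_znakow then PySem.Set.add w znak else w)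
      PySem.Set.empty
  wynik.map (fun c => String.ofList [c])

-- ===== PORT B =====
-- recursive partition over the characters; 'glowa | recursion' is a union of disjoint sets
-- (c was deleted from reszta), ported as Set.union
def wiecej_niz_alt_go (l : List Char) (liczba_znakow : Int) : PySem.Set Char :=
  match l with
  | [] => PySem.Set.empty
  | c :: t =>
    let reszta := (c :: t).filter (fun z => z != c)
    let glowa : PySem.Set Char :=
      if ((c :: t).length : Int) - (reszta.length : Int) > liczba_znakow then [c]
      else PySem.Set.empty
    PySem.Set.union glowa (wiecej_niz_alt_go reszta liczba_znakow)
termination_by l.length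
decreasing_by
  simp only [List.filter_cons, bne_self_eq_false, List.length_cons]
  exact Nat.lt_succ_of_le (List.length_filter_le _ t)

def wiecej_niz_alt (napis : String) (liczba_znakow : Int) : List String :=
  (wiecej_niz_alt_go napis.toList liczba_znakow).map (fun c => String.ofList [c])

-- ===== PRECONDITION & SPEC =====
def Spec_wiecej_niz (napis : String) (liczba_znakow : Int) (out : List String) : Prop := out = wiecej_niz_alt napis liczba_znakow
instance (napis : String) (liczba_znakow : Int) (out : List String) : Decidable (Spec_wiecej_niz napis liczba_znakow out) := by unfold Spec_wiecej_niz; infer_instance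

-- ===== CLAIM (what is proved, stated in full; the proofs are below) =====
def Claim_equal_wiecej_niz : Prop := ∀ (napis : String) (liczba_znakow : Int), Dom_wiecej_niz napis liczba_znakow → Spec_wiecej_niz napis liczba_znakow (wiecej_niz napis liczba_znakow)

-- ===== LEMMAS AND PROOFS =====

-- A's collecting loop over a Nodup list of fresh elements is a filter appended to the accumulator.
lemma foldl_add_if_eq_filter (p : Char → Prop) [DecidablePred p] :
    ∀ (l : List Char) (s : PySem.Set Char), l.Nodup → (∀ x ∈ l, x ∉ s) →
      l.foldl (fun w z => if p z then PySem.Set.add w z else w) s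
        = s ++ l.filter (fun z => decide (p z)) := by
  intro l
  induction l with
  | nil => intro s _ _; simp
  | cons h t ih =>
    intro s hnd hfresh
    have hhs : h ∉ s := hfresh h (by simp)
    have hnd' := hnd
    simp only [List.nodup_cons] at hnd'
    have step : (if p h then PySem.Set.add s h else s) = if p h then s ++ [h] else s := by
      by_cases hp : p h <;> simp [hp, PySem.Set.add_of_not_mem hhs]
    have hfresh' : ∀ x ∈ t, x ∉ (if p h then PySem.Set.add s h else s) := by
      intro x hx
      have hxh : x ≠ h := fun e => hnd'.1 (e ▸ hx)
      have hxs : x ∉ s := hfresh x (by simp [hx])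
      by_cases hp : p h <;> simp [hp, PySem.Set.mem_add, hxs, hxh]
    simp only [List.foldl_cons]
    rw [ih _ hnd'.2 hfresh', step]
    by_cases hp : p h <;> simp [hp]

-- set(xs) commutes with filtering the underlying list
lemma ofList_filter (p : Char → Bool) (t : List Char) :
    PySem.Set.ofList (t.filter p) = (PySem.Set.ofList t).filter p := by
  induction t with
  | nil => simp
  | cons x t ih =>
    rw [PySem.Set.ofList_cons]
    by_cases hp : p x = true
    · rw [List.filter_cons_of_pos hp, PySem.Set.ofList_cons, List.filter_cons_of_pos hp]
      congr 1
      simp only [PySem.Set.discard]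
      rw [ih, List.filter_comm]
    · rw [List.filter_cons_of_neg hp, List.filter_cons_of_neg hp]
      simp only [PySem.Set.discard]
      rw [List.filter_comm, ih]
      symm
      apply List.filter_eq_self.mpr
      intro y hy
      have hyp : p y = true := List.of_mem_filter hy
      have hne : y ≠ x := fun e => hp (e ▸ hyp)
      simp [hne]

-- B's recursion computes the distinct characters with count above the threshold,
-- in first-occurrence order
lemma go_eq (k : Int) : ∀ (n : Nat) (l : List Char), l.length ≤ n →
    wiecej_niz_alt_go l k
      = (PySem.Set.ofList l).filter (fun z => decide ((l.count z : Int) > k)) := by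
  intro n
  induction n with
  | zero =>
    intro l hl
    have h0 : l = [] := List.eq_nil_of_length_eq_zero (Nat.le_zero.mp hl)
    subst h0
    simp [wiecej_niz_alt_go]
  | succ n ih =>
    intro l hl
    cases l with
    | nil => simp [wiecej_niz_alt_go]
    | cons c t =>
      rw [wiecej_niz_alt_go]
      have hRt : (c :: t).filter (fun z => z != c) = t.filter (fun z => z != c) := by
        simp
      set R := t.filter (fun z => z != c) with hR
      rw [hRt]
      have hlen : R.length ≤ n := le_trans (List.length_filter_le _ t) (Nat.succ_le_succ_iff.mp hl)
      -- length drop = multiplicity of c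
      have hcl : R.length + t.count c = t.length := by
        rw [hR, ← List.countP_eq_length_filter]
        have h := List.length_eq_countP_add_countP (p := fun x => x == c) (l := t)
        have e : List.countP (fun z => z != c) t
            = List.countP (fun a => decide ¬((fun x => x == c) a) = true) t := by
          apply List.countP_congr; intro x _; simp [bne]
        simp only [List.count, e]
        omega
      have hA : ((c :: t).length : Int) - (R.length : Int) = ((c :: t).count c : Int) := by
        simp only [List.length_cons, List.count_cons_self]
        push_cast
        omega
      have hcnotR : c ∉ R := by simp [hR, List.mem_filter]
      have hnodupF : ((PySem.Set.ofList R).filter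
          (fun z => decide ((R.count z : Int) > k))).Nodup :=
        (PySem.Set.nodup_ofList R).filter _
      have hmemF : ∀ x ∈ (PySem.Set.ofList R).filter
          (fun z => decide ((R.count z : Int) > k)), x ≠ c := by
        intro x hx he
        exact hcnotR (he ▸ (PySem.List.mem_dedup R x).mp (List.mem_of_mem_filter hx))
      -- RHS: set(c :: t) = c :: set(R), then split the filter
      have hofL : PySem.Set.ofList (c :: t) = c :: PySem.Set.ofList R := by
        rw [PySem.Set.ofList_cons]
        congr 1
        rw [hR, ofList_filter]
        rfl
      have hcongr : (PySem.Set.ofList R).filter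
            (fun z => decide (((c :: t).count z : Int) > k))
          = (PySem.Set.ofList R).filter (fun z => decide ((R.count z : Int) > k)) := by
        apply List.filter_congr
        intro z hz
        have hzR : z ∈ R := (PySem.List.mem_dedup R z).mp hz
        have hzc : z ≠ c := by
          have := List.of_mem_filter (hR ▸ hzR)
          simpa [bne] using this
        have h1 : (c :: t).count z = t.count z := by
          simp [Ne.symm hzc]
        have h2 : R.count z = t.count z := by
          rw [hR]; exact List.count_filter (by simp [hzc])
        rw [h1, h2]
      rw [ih R hlen, hofL, List.filter_cons, hcongr, hA]
      by_cases hcase : (((c :: t).count c : Int) > k)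
      · simp only [hcase, if_pos, decide_true]
        show PySem.Set.update [c] _ = _
        rw [PySem.Set.update_eq_append_of_disjoint _ _ hnodupF
          (fun x hx => by simp [hmemF x hx])]
        rfl
      · simp only [hcase, if_neg, decide_false, not_false_iff]
        show PySem.Set.update [] _ = _
        rw [PySem.Set.update_nil_left]
        exact PySem.Set.ofList_eq_self_of_nodup _ hnodupF

theorem wiecej_niz_eq_alt (napis : String) (liczba_znakow : Int) :
    wiecej_niz napis liczba_znakow = wiecej_niz_alt napis liczba_znakow := by
  simp only [wiecej_niz, wiecej_niz_alt]
  rw [PySem.Dict.foldl_insert_getD_add_one_eq_counter]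
  rw [foldl_add_if_eq_filter (fun z => (PySem.Dict.counter napis.toList).getD z 0 > liczba_znakow) _ _
      (by rw [PySem.Dict.keys_counter]; exact PySem.Set.nodup_ofList _)
      (by intro x _ hx; simp [PySem.Set.empty] at hx)]
  rw [PySem.Dict.keys_counter]
  simp only [PySem.Set.empty, List.nil_append]
  rw [go_eq liczba_znakow napis.toList.length napis.toList le_rfl]
  congr 1
  apply List.filter_congr
  intro z _
  simp [PySem.Dict.getD_counter]

-- ===== VERDICT (by name: the statement is the Claim_ definition above) =====
theorem wiecej_niz_spec : Claim_equal_wiecej_niz := by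
  intro napis liczba_znakow _
  exact wiecej_niz_eq_alt napis liczba_znakow
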